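-- pv_equiv track=rewrite | github.com/adamsachs/NLP | POStagger/solutionsB.py | split_wordtags
-- ===== SOURCE A (Python) =====
-- def split_wordtags(brown_train):
--
--     wbrown = []
--     tbrown = []
--
--     for sentence in brown_train:
--         words = sentence.split()
--         words.insert(0, '*/*')
--         words.insert(0, '*/*')
--         words.append('STOP/STOP')
--         wordList = []
--         tagList = []
--         for word in words:
--             splitword = word.rsplit("/", 1)
--             wordList.append(splitword[0])
--             tagList.append(splitword[1])
--
--         wbrown.append(wordList)
--         tbrown.append(tagList)
--
--     return wbrown, tbrown
-- ===== SOURCE B (Python) =====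
-- def split_wordtags(brown_train):
--     # single character-level scan per sentence: no split()/rsplit(); word/tag buffers
--     # are maintained directly, a '/' moves the tag buffer into the word buffer.
--     wbrown = []
--     tbrown = []
--     for sentence in brown_train:
--         wordList = ['*', '*']
--         tagList = ['*', '*']
--         wbuf = ''   # chars before the last '/' of the current token
--         tbuf = ''   # chars after the last '/' seen so far
--         seen = False  # has the current token contained a '/'?
--         for c in sentence:
--             if c.isspace():
--                 if seen or tbuf:
--                     wordList.append(wbuf if seen else tbuf)
--                     tagList.append(tbuf if seen else '')
--                     wbuf, tbuf, seen = '', '', False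
--             elif c == '/':
--                 wbuf = wbuf + '/' + tbuf if seen else tbuf
--                 tbuf, seen = '', True
--             else:
--                 tbuf += c
--         if seen or tbuf:
--             wordList.append(wbuf if seen else tbuf)
--             tagList.append(tbuf if seen else '')
--         wordList.append('STOP')
--         tagList.append('STOP')
--         wbrown.append(wordList)
--         tbrown.append(tagList)
--     return wbrown, tbrown
-- ===== Notes on version B (the rewrite author's own statement) =====
-- stated objective: alternative
-- what changed: B replaces A's split()/rsplit('/',1) pipeline by a single character-level state machine per sentence: it scans the characters once, keeping a word buffer, a tag buffer and a seen-slash flag, moving the tag buffer into the word buffer at each '/' and emitting a (word,tag) pair at each whitespace boundary, so no string-splitting library call is used at all.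
import Mathlib
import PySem

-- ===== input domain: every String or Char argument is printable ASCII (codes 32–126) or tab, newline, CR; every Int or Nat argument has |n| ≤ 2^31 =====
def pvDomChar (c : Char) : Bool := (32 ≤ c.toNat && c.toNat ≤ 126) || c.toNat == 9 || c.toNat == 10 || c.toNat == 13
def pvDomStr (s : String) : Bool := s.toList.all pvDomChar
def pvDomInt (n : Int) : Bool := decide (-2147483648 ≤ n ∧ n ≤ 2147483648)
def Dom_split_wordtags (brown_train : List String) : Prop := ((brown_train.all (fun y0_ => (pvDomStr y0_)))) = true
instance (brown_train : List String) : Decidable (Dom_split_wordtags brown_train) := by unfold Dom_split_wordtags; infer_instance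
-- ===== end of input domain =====

-- ===== PORT A =====
-- B replaces A's split()/rsplit pipeline by a single character-level state machine; return value only, no observable mutation.
-- w.rsplit("/", 1): splits at the LAST '/' (exact for the one-maxsplit case used here); two pieces if '/' occurs, else the single piece [w].
def pyRsplitSlash1 : List Char → List (List Char)
  | [] => [[]]
  | c :: rest =>
    match pyRsplitSlash1 rest with
    | [one] => if c = '/' then [[], one] else [c :: one]
    | [pre, post] => [c :: pre, post]
    | other => other

def split_wordtags (brown_train : List String) : List (List String) × List (List String) :=
  brown_train.foldl
    (fun acc sentence =>
      let words := "*/*" :: "*/*" :: (PySem.Str.split₀ sentence ++ ["STOP/STOP"])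
      let inner := words.foldl
        (fun (p : List String × List String) word =>
          let splitword := pyRsplitSlash1 word.toList
          -- splitword[1] raises IndexError when no '/'; such inputs are outside Pre_ (getD is a placeholder there)
          (p.1 ++ [String.ofList (splitword.getD 0 [])], p.2 ++ [String.ofList (splitword.getD 1 [])]))
        ([], [])
      (acc.1 ++ [inner.1], acc.2 ++ [inner.2]))
    ([], [])

-- ===== PORT B =====
-- scanner state: (wordList, tagList) so far, and (wbuf, tbuf, seen) for the current token
def pvScanStep (st : (List String × List String) × (List Char × List Char × Bool)) (c : Char) :
    (List String × List String) × (List Char × List Char × Bool) :=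
  let wbuf := st.2.1
  let tbuf := st.2.2.1
  let seen := st.2.2.2
  if PySem.Chars.isspace c then
    if seen || !tbuf.isEmpty then
      ((st.1.1 ++ [String.ofList (if seen then wbuf else tbuf)],
        st.1.2 ++ [String.ofList (if seen then tbuf else [])]),
       ([], [], false))
    else st
  else if c = '/' then
    (st.1, ((if seen then wbuf ++ '/' :: tbuf else tbuf), [], true))
  else
    (st.1, (wbuf, tbuf ++ [c], seen))

-- the trailing 'if seen or tbuf: append' flush of Source B
def pvFlush (st : (List String × List String) × (List Char × List Char × Bool)) :
    List String × List String :=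
  let wbuf := st.2.1
  let tbuf := st.2.2.1
  let seen := st.2.2.2
  if seen || !tbuf.isEmpty then
    (st.1.1 ++ [String.ofList (if seen then wbuf else tbuf)],
     st.1.2 ++ [String.ofList (if seen then tbuf else [])])
  else st.1

def split_wordtags_alt (brown_train : List String) : List (List String) × List (List String) :=
  brown_train.foldl
    (fun acc sentence =>
      let st := sentence.toList.foldl pvScanStep ((["*", "*"], ["*", "*"]), ([], [], false))
      let lists := pvFlush st
      (acc.1 ++ [lists.1 ++ ["STOP"]], acc.2 ++ [lists.2 ++ ["STOP"]]))
    ([], [])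

-- ===== PRECONDITION & SPEC =====
-- Pre_ excludes inputs where some whitespace-separated token contains no '/': there A raises
-- IndexError (splitword[1]), so A returns no value to match.
def Pre_split_wordtags (brown_train : List String) : Prop :=
  (brown_train.all (fun s => (PySem.Str.split₀ s).all (fun w => w.toList.contains '/'))) = true
instance (brown_train : List String) : Decidable (Pre_split_wordtags brown_train) := by
  unfold Pre_split_wordtags; infer_instance
def pvWitness_split_wordtags : List String := ["The/AT dog/NN ./.", "run/VB"]

def Spec_split_wordtags (brown_train : List String) (out : List (List String) × List (List String)) : Prop := out = split_wordtags_alt brown_train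
instance (brown_train : List String) (out : List (List String) × List (List String)) : Decidable (Spec_split_wordtags brown_train out) := by unfold Spec_split_wordtags; infer_instance

-- ===== CLAIM (what is proved, stated in full; the proofs are below) =====
def Claim_equal_split_wordtags : Prop := ∀ (brown_train : List String), Dom_split_wordtags brown_train → Pre_split_wordtags brown_train → Spec_split_wordtags brown_train (split_wordtags brown_train)

-- ===== LEMMAS AND PROOFS =====
-- proof-side abbreviations: the word column and the tag column of one token (String / List Char forms)
def pvCol0 (w : String) : String := String.ofList ((pyRsplitSlash1 w.toList).getD 0 [])
def pvCol1 (w : String) : String := String.ofList ((pyRsplitSlash1 w.toList).getD 1 [])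
def pvColC0 (t : List Char) : String := String.ofList ((pyRsplitSlash1 t).getD 0 [])
def pvColC1 (t : List Char) : String := String.ofList ((pyRsplitSlash1 t).getD 1 [])

-- A's inner loop = the two column maps, for any starting accumulator
theorem inner_foldl_eq (ws : List String) (p : List String × List String) :
    ws.foldl
      (fun (p : List String × List String) word =>
        (p.1 ++ [String.ofList ((pyRsplitSlash1 word.toList).getD 0 [])],
         p.2 ++ [String.ofList ((pyRsplitSlash1 word.toList).getD 1 [])]))
      p
    = (p.1 ++ ws.map pvCol0, p.2 ++ ws.map pvCol1) := by
  induction ws generalizing p with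
  | nil => simp
  | cons w ws ih => rw [List.foldl_cons, ih]; simp [pvCol0, pvCol1]

-- A's outer loop = per-sentence row list, for any starting accumulator
theorem outer_foldl_eq (l : List String) (acc : List (List String) × List (List String)) :
    l.foldl
      (fun acc sentence =>
        let words := "*/*" :: "*/*" :: (PySem.Str.split₀ sentence ++ ["STOP/STOP"])
        let inner := words.foldl
          (fun (p : List String × List String) word =>
            (p.1 ++ [String.ofList ((pyRsplitSlash1 word.toList).getD 0 [])],
             p.2 ++ [String.ofList ((pyRsplitSlash1 word.toList).getD 1 [])]))
          ([], [])
        (acc.1 ++ [inner.1], acc.2 ++ [inner.2]))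
      acc
    = (acc.1 ++ l.map (fun s => ("*/*" :: "*/*" :: (PySem.Str.split₀ s ++ ["STOP/STOP"])).map pvCol0),
       acc.2 ++ l.map (fun s => ("*/*" :: "*/*" :: (PySem.Str.split₀ s ++ ["STOP/STOP"])).map pvCol1)) := by
  induction l generalizing acc with
  | nil => simp
  | cons s l ih => rw [List.foldl_cons, ih]; simp only [inner_foldl_eq]; simp [pvCol0, pvCol1]

-- rsplit facts
theorem rsplit_cases (t : List Char) :
    pyRsplitSlash1 t = [t] ∨ ∃ p q, pyRsplitSlash1 t = [p, q] := by
  induction t with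
  | nil => left; rfl
  | cons c rest ih =>
    rcases ih with h | ⟨p, q, h⟩
    · by_cases hc : c = '/'
      · right; exact ⟨[], rest, by simp [pyRsplitSlash1, h, hc]⟩
      · left; simp [pyRsplitSlash1, h, hc]
    · right; exact ⟨c :: p, q, by simp [pyRsplitSlash1, h]⟩

theorem rsplit_one_eq {t x : List Char} (h : pyRsplitSlash1 t = [x]) : x = t := by
  induction t generalizing x with
  | nil => simp [pyRsplitSlash1] at h; simp [h]
  | cons c rest ih =>
    rcases rsplit_cases rest with h' | ⟨p, q, h'⟩
    · by_cases hc : c = '/'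
      · simp [pyRsplitSlash1, h', hc] at h
      · simp [pyRsplitSlash1, h', hc] at h
        rw [← h, ih h']
    · simp [pyRsplitSlash1, h'] at h

theorem rsplit_app_char_one {t x : List Char} {c : Char} (h : pyRsplitSlash1 t = [x])
    (hc : c ≠ '/') : pyRsplitSlash1 (t ++ [c]) = [x ++ [c]] := by
  induction t generalizing x with
  | nil => simp [pyRsplitSlash1] at h ⊢; simp [← h, hc]
  | cons d rest ih =>
    rcases rsplit_cases rest with h' | ⟨p, q, h'⟩
    · by_cases hd : d = '/'
      · simp [pyRsplitSlash1, h', hd] at h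
      · simp [pyRsplitSlash1, h', hd] at h
        simp [pyRsplitSlash1, ih h', hd, ← h]
    · simp [pyRsplitSlash1, h'] at h

theorem rsplit_app_char_two {t p q : List Char} {c : Char} (h : pyRsplitSlash1 t = [p, q])
    (hc : c ≠ '/') : pyRsplitSlash1 (t ++ [c]) = [p, q ++ [c]] := by
  induction t generalizing p q with
  | nil => simp [pyRsplitSlash1] at h
  | cons d rest ih =>
    rcases rsplit_cases rest with h' | ⟨p', q', h'⟩
    · by_cases hd : d = '/'
      · simp [pyRsplitSlash1, h', hd] at h
        obtain ⟨rfl, rfl⟩ := h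
        simp [pyRsplitSlash1, rsplit_app_char_one h' hc, hd]
      · simp [pyRsplitSlash1, h', hd] at h
    · simp [pyRsplitSlash1, h'] at h
      simp [pyRsplitSlash1, ih h', ← h.1, ← h.2]

theorem rsplit_app_slash_one {t x : List Char} (h : pyRsplitSlash1 t = [x]) :
    pyRsplitSlash1 (t ++ ['/']) = [x, []] := by
  induction t generalizing x with
  | nil => simp [pyRsplitSlash1] at h ⊢; simp [← h]
  | cons d rest ih =>
    rcases rsplit_cases rest with h' | ⟨p, q, h'⟩
    · by_cases hd : d = '/'
      · simp [pyRsplitSlash1, h', hd] at h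
      · simp [pyRsplitSlash1, h', hd] at h
        simp [pyRsplitSlash1, ih h', ← h]
    · simp [pyRsplitSlash1, h'] at h

theorem rsplit_app_slash_two {t p q : List Char} (h : pyRsplitSlash1 t = [p, q]) :
    pyRsplitSlash1 (t ++ ['/']) = [p ++ '/' :: q, []] := by
  induction t generalizing p q with
  | nil => simp [pyRsplitSlash1] at h
  | cons d rest ih =>
    rcases rsplit_cases rest with h' | ⟨p', q', h'⟩
    · by_cases hd : d = '/'
      · simp [pyRsplitSlash1, h', hd] at h
        obtain ⟨rfl, rfl⟩ := h
        simp [pyRsplitSlash1, rsplit_app_slash_one h', hd]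
      · simp [pyRsplitSlash1, h', hd] at h
    · simp [pyRsplitSlash1, h'] at h
      simp [pyRsplitSlash1, ih h', ← h.1, ← h.2]

-- the scanner state (wbuf, tbuf, seen) describes the rsplit of the current (reversed) token cur
def pvRel (cur wbuf tbuf : List Char) (seen : Bool) : Prop :=
  if seen then pyRsplitSlash1 cur.reverse = [wbuf, tbuf]
  else pyRsplitSlash1 cur.reverse = [tbuf] ∧ wbuf = []

-- split₀.go accumulates into acc and reverses at the end
theorem go_acc (cs : List Char) : ∀ cur acc,
    PySem.Chars.split₀.go cs cur acc = acc.reverse ++ PySem.Chars.split₀.go cs cur [] := by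
  induction cs with
  | nil => intro cur acc; by_cases h : cur.isEmpty <;> simp [PySem.Chars.split₀.go, h]
  | cons c rest ih =>
    intro cur acc
    by_cases hs : PySem.Chars.isspace c
    · by_cases h : cur.isEmpty
      · simp only [PySem.Chars.split₀.go, hs, h, if_true]
        exact ih [] acc
      · simp only [PySem.Chars.split₀.go, hs, h, if_true, if_false, Bool.false_eq_true]
        rw [ih [] (cur.reverse :: acc), ih [] [cur.reverse]]
        simp
    · simp only [PySem.Chars.split₀.go, hs, if_false, Bool.false_eq_true]
      exact ih _ _

-- MAIN: the char scan + final flush = the two rsplit-column maps over split₀'s tokens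
theorem scan_eq (cs : List Char) : ∀ cur wL tL wbuf tbuf seen,
    pvRel cur wbuf tbuf seen →
    pvFlush (cs.foldl pvScanStep ((wL, tL), (wbuf, tbuf, seen)))
      = (wL ++ (PySem.Chars.split₀.go cs cur []).map pvColC0,
         tL ++ (PySem.Chars.split₀.go cs cur []).map pvColC1) := by
  induction cs with
  | nil =>
    intro cur wL tL wbuf tbuf seen hrel
    unfold pvRel at hrel
    cases seen with
    | true =>
      simp only [if_true] at hrel
      have hcur : ¬ cur.isEmpty := by
        intro h
        rw [List.isEmpty_iff] at h
        subst h; simp [pyRsplitSlash1] at hrel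
      simp [pvFlush, PySem.Chars.split₀.go, hcur, pvColC0, pvColC1, hrel]
    | false =>
      simp only [Bool.false_eq_true, if_false] at hrel
      obtain ⟨h1, h2⟩ := hrel
      have htb : tbuf = cur.reverse := rsplit_one_eq h1
      by_cases hcur : cur.isEmpty
      · rw [List.isEmpty_iff] at hcur
        subst hcur; simp at htb
        simp [pvFlush, PySem.Chars.split₀.go, htb]
      · have htb' : ¬ tbuf.isEmpty := by
          simp only [List.isEmpty_iff] at hcur ⊢
          simp [htb, hcur]
        simp [pvFlush, PySem.Chars.split₀.go, hcur, htb', pvColC0, pvColC1, h1]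
  | cons c rest ih =>
    intro cur wL tL wbuf tbuf seen hrel
    unfold pvRel at hrel
    rw [List.foldl_cons]
    by_cases hs : PySem.Chars.isspace c
    · -- whitespace: maybe flush
      cases seen with
      | true =>
        simp only [if_true] at hrel
        have hcur : ¬ cur.isEmpty := by
          intro h; rw [List.isEmpty_iff] at h; subst h; simp [pyRsplitSlash1] at hrel
        have step : pvScanStep ((wL, tL), (wbuf, tbuf, true)) c
            = ((wL ++ [String.ofList wbuf], tL ++ [String.ofList tbuf]), ([], [], false)) := by
          simp [pvScanStep, hs]
        rw [step, ih [] _ _ [] [] false (by simp [pvRel, pyRsplitSlash1])]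
        simp only [PySem.Chars.split₀.go, hs, hcur, if_true, if_false, Bool.false_eq_true]
        rw [go_acc rest [] [cur.reverse]]
        simp [pvColC0, pvColC1, hrel]
      | false =>
        simp only [Bool.false_eq_true, if_false] at hrel
        obtain ⟨h1, h2⟩ := hrel
        have htb : tbuf = cur.reverse := rsplit_one_eq h1
        by_cases hcur : cur.isEmpty
        · rw [List.isEmpty_iff] at hcur
          subst hcur; simp at htb
          have step : pvScanStep ((wL, tL), (wbuf, tbuf, false)) c = ((wL, tL), (wbuf, tbuf, false)) := by
            simp [pvScanStep, hs, htb]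
          rw [step, ih [] _ _ wbuf tbuf false (by simp [pvRel, pyRsplitSlash1, htb, h2])]
          simp [PySem.Chars.split₀.go, hs]
        · have htb' : ¬ tbuf.isEmpty := by
            simp only [List.isEmpty_iff] at hcur ⊢; simp [htb, hcur]
          have step : pvScanStep ((wL, tL), (wbuf, tbuf, false)) c
              = ((wL ++ [String.ofList tbuf], tL ++ [String.ofList []]), ([], [], false)) := by
            simp [pvScanStep, hs, htb']
          rw [step, ih [] _ _ [] [] false (by simp [pvRel, pyRsplitSlash1])]
          simp only [PySem.Chars.split₀.go, hs, hcur, if_true, if_false, Bool.false_eq_true]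
          rw [go_acc rest [] [cur.reverse]]
          simp [pvColC0, pvColC1, h1]
    · by_cases hc : c = '/'
      · -- slash: move tag buffer into word buffer
        subst hc
        have step : pvScanStep ((wL, tL), (wbuf, tbuf, seen)) '/'
            = ((wL, tL), ((if seen then wbuf ++ '/' :: tbuf else tbuf), [], true)) := by
          simp [pvScanStep, hs]
        rw [step]
        have hrel' : pvRel ('/' :: cur) (if seen then wbuf ++ '/' :: tbuf else tbuf) [] true := by
          cases seen with
          | true =>
            simp only [if_true] at hrel ⊢
            simp only [pvRel, if_true, List.reverse_cons]
            exact rsplit_app_slash_two hrel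
          | false =>
            simp only [Bool.false_eq_true, if_false] at hrel ⊢
            simp only [pvRel, if_true, List.reverse_cons]
            exact rsplit_app_slash_one hrel.1
        rw [ih ('/' :: cur) _ _ _ _ _ hrel']
        simp [PySem.Chars.split₀.go, hs]
      · -- ordinary char: extend tag buffer
        have step : pvScanStep ((wL, tL), (wbuf, tbuf, seen)) c
            = ((wL, tL), (wbuf, tbuf ++ [c], seen)) := by
          simp [pvScanStep, hs, hc]
        rw [step]
        have hrel' : pvRel (c :: cur) wbuf (tbuf ++ [c]) seen := by
          cases seen with
          | true =>
            simp only [if_true] at hrel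
            simp only [pvRel, if_true, List.reverse_cons]
            exact rsplit_app_char_two hrel hc
          | false =>
            simp only [Bool.false_eq_true, if_false] at hrel
            simp only [pvRel, Bool.false_eq_true, if_false, List.reverse_cons]
            exact ⟨rsplit_app_char_one hrel.1 hc, hrel.2⟩
        rw [ih (c :: cur) _ _ _ _ _ hrel']
        simp [PySem.Chars.split₀.go, hs]

-- B's outer loop, for any starting accumulator
theorem alt_outer_eq (l : List String) (acc : List (List String) × List (List String)) :
    l.foldl
      (fun acc sentence =>
        let st := sentence.toList.foldl pvScanStep ((["*", "*"], ["*", "*"]), ([], [], false))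
        let lists := pvFlush st
        (acc.1 ++ [lists.1 ++ ["STOP"]], acc.2 ++ [lists.2 ++ ["STOP"]]))
      acc
    = (acc.1 ++ l.map (fun s => (pvFlush (s.toList.foldl pvScanStep ((["*", "*"], ["*", "*"]), ([], [], false)))).1 ++ ["STOP"]),
       acc.2 ++ l.map (fun s => (pvFlush (s.toList.foldl pvScanStep ((["*", "*"], ["*", "*"]), ([], [], false)))).2 ++ ["STOP"])) := by
  induction l generalizing acc with
  | nil => simp
  | cons s l ih => rw [List.foldl_cons, ih]; simp

-- the two per-sentence rows agree
theorem row_eq (s : String) :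
    (pvFlush (s.toList.foldl pvScanStep ((["*", "*"], ["*", "*"]), ([], [], false)))).1 ++ ["STOP"]
      = ("*/*" :: "*/*" :: (PySem.Str.split₀ s ++ ["STOP/STOP"])).map pvCol0
    ∧ (pvFlush (s.toList.foldl pvScanStep ((["*", "*"], ["*", "*"]), ([], [], false)))).2 ++ ["STOP"]
      = ("*/*" :: "*/*" :: (PySem.Str.split₀ s ++ ["STOP/STOP"])).map pvCol1 := by
  rw [scan_eq s.toList [] _ _ [] [] false (by simp [pvRel, pyRsplitSlash1])]
  constructor <;>
  · simp [PySem.Str.split₀, PySem.Chars.split₀, List.map_map, Function.comp_def,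
      pvCol0, pvCol1, pvColC0, pvColC1]
    decide

theorem split_wordtags_spec : Claim_equal_split_wordtags := by
  intro brown_train _ _
  unfold Spec_split_wordtags split_wordtags split_wordtags_alt
  rw [outer_foldl_eq, alt_outer_eq]
  simp only [List.nil_append, Prod.mk.injEq]
  exact ⟨List.map_congr_left fun s _ => (row_eq s).1.symm,
         List.map_congr_left fun s _ => (row_eq s).2.symm⟩
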